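-- pv_equiv track=rewrite | github.com/LiveOAK55/Coins---2 | code.py | check
-- ===== SOURCE A (Python) =====
-- def check(n, w, d, m):
--     sm = 0
--     for i in range(1, n):
--         sm += (i * w)
--     res = abs((m - sm)//d)
--     if sm == m:
--         res = n
--     return res
-- ===== SOURCE B (Python) =====
-- def check(n, w, d, m):
--     sm = w * (n * (n - 1) // 2) if n > 0 else 0
--     return n if sm == m else abs((m - sm) // d)
-- ===== Notes on version B (the rewrite author's own statement) =====
-- stated objective: faster
-- what changed: Replaces the O(n) summation loop with the closed-form triangular sum w*(n*(n-1)//2).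
import Mathlib
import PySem

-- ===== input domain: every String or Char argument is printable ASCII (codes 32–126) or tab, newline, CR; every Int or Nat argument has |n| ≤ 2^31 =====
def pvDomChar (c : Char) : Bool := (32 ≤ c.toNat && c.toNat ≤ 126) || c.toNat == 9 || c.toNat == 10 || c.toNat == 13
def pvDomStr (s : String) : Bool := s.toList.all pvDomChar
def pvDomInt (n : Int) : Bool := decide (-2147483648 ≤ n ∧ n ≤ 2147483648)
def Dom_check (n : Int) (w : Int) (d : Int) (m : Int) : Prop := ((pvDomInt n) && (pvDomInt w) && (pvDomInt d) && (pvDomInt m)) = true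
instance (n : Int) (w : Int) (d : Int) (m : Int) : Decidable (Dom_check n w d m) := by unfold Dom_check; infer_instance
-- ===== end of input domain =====

-- B replaces A's O(n) summation loop with the closed-form triangular sum w*(n*(n-1)//2); return values are identical whenever d ≠ 0.

-- ===== PORT A =====
def check (n : Int) (w : Int) (d : Int) (m : Int) : Int :=
  let sm := (PySem.List.pyRange 1 n 1).foldl (fun s i => s + i * w) 0
  let res := |PySem.Int.floordiv (m - sm) d|
  if sm = m then n else res

-- ===== PORT B =====
def check_alt (n : Int) (w : Int) (d : Int) (m : Int) : Int :=
  let sm := if n > 0 then w * PySem.Int.floordiv (n * (n - 1)) 2 else 0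
  if sm = m then n else |PySem.Int.floordiv (m - sm) d|

-- ===== PRECONDITION & SPEC =====
-- Pre_check excludes exactly d = 0, where Python A raises ZeroDivisionError.
def Pre_check (n : Int) (w : Int) (d : Int) (m : Int) : Prop := d ≠ 0
instance (n : Int) (w : Int) (d : Int) (m : Int) : Decidable (Pre_check n w d m) := by unfold Pre_check; infer_instance
def pvWitness_check : Int × Int × Int × Int := (3, 2, 1, 5)

def Spec_check (n : Int) (w : Int) (d : Int) (m : Int) (out : Int) : Prop := out = check_alt n w d m
instance (n : Int) (w : Int) (d : Int) (m : Int) (out : Int) : Decidable (Spec_check n w d m out) := by unfold Spec_check; infer_instance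

-- ===== CLAIM (what is proved, stated in full; the proofs are below) =====
def Claim_equal_check : Prop := ∀ (n : Int) (w : Int) (d : Int) (m : Int), Dom_check n w d m → Pre_check n w d m → Spec_check n w d m (check n w d m)

-- ===== LEMMAS AND PROOFS =====

-- Loop sum over range(1, 1+k), doubled, equals w * (1+k) * k.
lemma loop_sum_two (w : Int) (k : Nat) :
    ((PySem.List.pyRange 1 (1 + (k : Int)) 1).foldl (fun s i => s + i * w) 0) * 2
      = w * ((1 + (k : Int)) * k) := by
  induction k with
  | zero => simp [PySem.List.pyRange_one_eq_nil]
  | succ k ih =>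
      have h : (1 : Int) ≤ 1 + (k : Int) := by omega
      have hr : PySem.List.pyRange 1 (1 + ((k : Int) + 1)) 1
          = PySem.List.pyRange 1 (1 + (k : Int)) 1 ++ [1 + (k : Int)] := by
        have heq : (1 : Int) + ((k : Int) + 1) = (1 + (k : Int)) + 1 := by ring
        rw [heq, PySem.List.pyRange_one_succ_right h]
      push_cast
      rw [hr, List.foldl_append]
      simp only [List.foldl_cons, List.foldl_nil]
      nlinarith [ih]

-- The loop equals B's closed form.
lemma loop_closed (w n : Int) :
    (PySem.List.pyRange 1 n 1).foldl (fun s i => s + i * w) 0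
      = (if n > 0 then w * PySem.Int.floordiv (n * (n - 1)) 2 else 0) := by
  by_cases hn : n > 0
  · simp only [hn, if_pos]
    obtain ⟨k, hk⟩ : ∃ k : Nat, n = 1 + (k : Int) :=
      ⟨(n - 1).toNat, by omega⟩
    subst hk
    have h2 := loop_sum_two w k
    have heven : ∃ t : Int, (1 + (k : Int)) * ((1 + (k : Int)) - 1) = 2 * t := by
      rcases Int.even_mul_succ_self (k : Int) with ⟨t, ht⟩
      exact ⟨t, by push_cast; nlinarith [ht]⟩
    obtain ⟨t, ht⟩ := heven
    have hfd : PySem.Int.floordiv ((1 + (k : Int)) * ((1 + (k : Int)) - 1)) 2 = t := by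
      rw [ht]
      simp [PySem.Int.floordiv, Int.mul_fdiv_cancel_left _ (by norm_num : (2:Int) ≠ 0)]
    rw [hfd]
    have : (1 + (k : Int)) * (k : Int) = 2 * t := by
      have : ((1 + (k : Int)) - 1) = (k : Int) := by ring
      nlinarith [ht]
    rw [this] at h2
    have h2' : ((PySem.List.pyRange 1 (1 + (k : Int)) 1).foldl (fun s i => s + i * w) 0) * 2 = (w * t) * 2 := by
      rw [h2]; ring
    exact mul_right_cancel₀ (by norm_num : (2:Int) ≠ 0) h2'
  · have hle : n ≤ 1 := by omega
    rw [PySem.List.pyRange_one_eq_nil hle]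
    simp [hn]

-- ===== VERDICT (by name: the statement is the Claim_ definition above) =====
theorem check_spec : Claim_equal_check := by
  intro n w d m _ _
  show check n w d m = check_alt n w d m
  unfold check check_alt
  rw [loop_closed]
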